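-- pv_equiv track=rewrite | github.com/KritzEZ/CPS109---Finding-Waldo | a2.py | find2Dmin
-- ===== SOURCE A (Python) =====
-- def find2Dmin(matrix):
--   minrow = 0
--   mincol = 0
--   lownum = matrix[0][0]
--   for x in range (len(matrix)):
--     for y in range (len(matrix[x])):
--       if matrix[x][y]<lownum:
--         lownum = matrix[x][y]
--         minrow = y
--         mincol = x
--   return(minrow, mincol)
-- ===== SOURCE B (Python) =====
-- def find2Dmin(matrix):
--     # Two-phase: summarize each non-empty row as (min, first index of min),
--     # then pick the earliest row with the strictly smallest min; return (col, row).
--     best = None  # (value, row, col)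
--     for r, row in enumerate(matrix):
--         if row:
--             v = min(row)
--             if best is None or v < best[0]:
--                 best = (v, r, row.index(v))
--     return (best[2], best[1])
-- ===== Notes on version B (the rewrite author's own statement) =====
-- stated objective: alternative
-- what changed: Replaces A's element-by-element index loops with running (minrow, mincol, lownum) state by a per-row reduction to (min, first index of min) via the builtins min/list.index, combined with a strict-less fold over the row summaries.
import Mathlib
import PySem

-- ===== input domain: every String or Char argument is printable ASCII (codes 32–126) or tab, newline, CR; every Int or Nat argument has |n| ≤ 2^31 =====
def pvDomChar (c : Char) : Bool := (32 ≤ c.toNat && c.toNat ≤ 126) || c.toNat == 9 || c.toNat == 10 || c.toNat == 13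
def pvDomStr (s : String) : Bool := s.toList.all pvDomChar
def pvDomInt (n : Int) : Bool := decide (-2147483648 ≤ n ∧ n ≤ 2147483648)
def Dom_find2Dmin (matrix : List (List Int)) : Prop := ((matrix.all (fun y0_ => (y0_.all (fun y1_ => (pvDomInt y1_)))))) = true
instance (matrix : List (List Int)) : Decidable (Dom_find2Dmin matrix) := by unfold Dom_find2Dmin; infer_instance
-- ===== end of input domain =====

-- B replaces the two index loops with per-row (min, first-index) summaries combined
-- by a strict-less fold; equal return value on Pre_ (nonempty matrix with nonempty first row).

-- ===== PORT A =====
def find2Dmin (matrix : List (List Int)) : Int × Int :=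
  -- state st = (minrow, mincol, lownum)
  let st :=
    (PySem.List.pyRange 0 (matrix.length : Int) 1).foldl (fun st x =>
      let row := PySem.List.pyGetD matrix x []
      (PySem.List.pyRange 0 (row.length : Int) 1).foldl (fun st y =>
        if PySem.List.pyGetD row y 0 < st.2.2 then (y, x, PySem.List.pyGetD row y 0) else st) st)
      ((0 : Int), (0 : Int), PySem.List.pyGetD (PySem.List.pyGetD matrix 0 []) 0 0)
  (st.1, st.2.1)

-- ===== PORT B =====
def find2Dmin_alt (matrix : List (List Int)) : Int × Int :=
  -- best = None | some (value, row, col)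
  let best :=
    (PySem.List.enumerate matrix 0).foldl (fun best p =>
      if p.2 ≠ [] then
        let v := (PySem.List.min? p.2 (fun z => z)).getD 0
        match best with
        | none => some (v, p.1, (((PySem.List.index? p.2 v).getD 0 : Nat) : Int))
        | some b => if v < b.1 then some (v, p.1, (((PySem.List.index? p.2 v).getD 0 : Nat) : Int)) else some b
      else best) (none : Option (Int × Int × Int))
  match best with
  | some b => (b.2.2, b.2.1)
  | none => (0, 0)  -- unreachable under Pre_ (Python B raises here)

-- ===== PRECONDITION & SPEC =====
-- Pre_ excludes exactly the inputs where A raises IndexError on matrix[0][0]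
-- (empty matrix or empty first row); B raises there too unless some later row is nonempty.
def Pre_find2Dmin (matrix : List (List Int)) : Prop := matrix.headD [] ≠ []
instance (matrix : List (List Int)) : Decidable (Pre_find2Dmin matrix) := by unfold Pre_find2Dmin; infer_instance

def pvWitness_find2Dmin : List (List Int) := [[3, 1], [2]]

def Spec_find2Dmin (matrix : List (List Int)) (out : Int × Int) : Prop := out = find2Dmin_alt matrix
instance (matrix : List (List Int)) (out : Int × Int) : Decidable (Spec_find2Dmin matrix out) := by unfold Spec_find2Dmin; infer_instance

-- ===== CLAIM (what is proved, stated in full; the proofs are below) =====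
def Claim_equal_find2Dmin : Prop := ∀ (matrix : List (List Int)), Dom_find2Dmin matrix → Pre_find2Dmin matrix → Spec_find2Dmin matrix (find2Dmin matrix)

-- ===== LEMMAS AND PROOFS =====

-- effect of A's inner loop over one row on the state (minrow, mincol, lownum):
-- if the row's minimum beats lownum, jump to (first index of that minimum, row index, minimum)
def pvRowStep (st : Int × Int × Int) (p : Int × List Int) : Int × Int × Int :=
  match PySem.List.min? p.2 (fun z => z) with
  | none => st
  | some v =>
      if v < st.2.2 then ((((PySem.List.index? p.2 v).getD 0 : Nat) : Int), p.1, v) else st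

-- B's fold body, named for the proofs (definitionally the lambda in find2Dmin_alt)
def pvBStep (best : Option (Int × Int × Int)) (p : Int × List Int) : Option (Int × Int × Int) :=
  if p.2 ≠ [] then
    let v := (PySem.List.min? p.2 (fun z => z)).getD 0
    match best with
    | none => some (v, p.1, (((PySem.List.index? p.2 v).getD 0 : Nat) : Int))
    | some b => if v < b.1 then some (v, p.1, (((PySem.List.index? p.2 v).getD 0 : Nat) : Int)) else some b
  else best

lemma pvEnumFold (x : Int) : ∀ (row : List Int) (s : Int) (st : Int × Int × Int),
    (PySem.List.enumerate row s).foldl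
      (fun st p => if p.2 < st.2.2 then (p.1, x, p.2) else st) st
    = match PySem.List.min? row (fun z => z) with
      | none => st
      | some v =>
          if v < st.2.2 then (s + (((PySem.List.index? row v).getD 0 : Nat) : Int), x, v) else st
  | [], s, st => by
    rw [show PySem.List.min? ([] : List Int) (fun z => z) = none from rfl]
    rfl
  | h :: t, s, st => by
    rw [PySem.List.enumerate_cons, List.foldl_cons, pvEnumFold x t (s + 1), PySem.List.min?_id_cons]
    cases t with
    | nil =>
        rw [show PySem.List.min? ([] : List Int) (fun z => z) = none from rfl]
        dsimp only [List.foldl_nil]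
        rw [PySem.List.index?_cons_self]
        simp
    | cons h' t' =>
        rw [PySem.List.min?_id_cons]
        have hfold : List.foldl min h (h' :: t') = min h (List.foldl min h' t') := by
          rw [List.foldl_cons, List.foldl_assoc]
        set w := List.foldl min h' t' with hw
        have hwmem : w ∈ h' :: t' :=
          PySem.List.min?_mem (xs := h' :: t') (key := fun z => z) (PySem.List.min?_id_cons h' t')
        obtain ⟨k, hk⟩ : ∃ k, PySem.List.index? (h' :: t') w = some k := by
          have := (PySem.List.index?_isSome_iff (h' :: t') w).mpr hwmem
          exact Option.isSome_iff_exists.mp this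
        by_cases hle : h ≤ w
        · have hmin : List.foldl min h (h' :: t') = h := by rw [hfold]; omega
          rw [hmin]
          dsimp only
          rw [PySem.List.index?_cons_self, hk]
          split_ifs <;> simp_all <;> omega
        · rw [not_le] at hle
          have hmin : List.foldl min h (h' :: t') = w := by rw [hfold]; omega
          have hne : h ≠ w := by omega
          rw [hmin]
          dsimp only
          rw [PySem.List.index?_cons_of_ne _ hne, hk]
          split_ifs <;> simp_all <;> omega

lemma pvInner (row : List Int) (x : Int) (st : Int × Int × Int) :
    (PySem.List.pyRange 0 (row.length : Int) 1).foldl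
      (fun st y => if PySem.List.pyGetD row y 0 < st.2.2 then (y, x, PySem.List.pyGetD row y 0) else st) st
    = pvRowStep st (x, row) := by
  have he := PySem.List.enumerate_eq_map_pyRange row 0
  have h1 : (PySem.List.enumerate row 0).foldl
      (fun st p => if p.2 < st.2.2 then (p.1, x, p.2) else st) st
      = (PySem.List.pyRange 0 (row.length : Int) 1).foldl
      (fun st y => if PySem.List.pyGetD row y 0 < st.2.2 then (y, x, PySem.List.pyGetD row y 0) else st) st := by
    rw [he, PySem.List.len_eq, List.foldl_map]
  rw [← h1, pvEnumFold]
  unfold pvRowStep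
  cases hm : PySem.List.min? row (fun z => z) with
  | none => rfl
  | some v => simp

lemma pvOuterEq (matrix : List (List Int)) (st : Int × Int × Int) :
    (PySem.List.pyRange 0 (matrix.length : Int) 1).foldl (fun st x =>
      let row := PySem.List.pyGetD matrix x []
      (PySem.List.pyRange 0 (row.length : Int) 1).foldl
        (fun st y => if PySem.List.pyGetD row y 0 < st.2.2 then (y, x, PySem.List.pyGetD row y 0) else st) st) st
    = (PySem.List.enumerate matrix 0).foldl pvRowStep st := by
  have he := PySem.List.enumerate_eq_map_pyRange matrix []
  rw [he, PySem.List.len_eq, List.foldl_map]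
  have hb : (fun (st : Int × Int × Int) (j : Int) => pvRowStep st (j, PySem.List.pyGetD matrix j []))
      = (fun st j =>
          let row := PySem.List.pyGetD matrix j []
          (PySem.List.pyRange 0 (row.length : Int) 1).foldl
            (fun st y => if PySem.List.pyGetD row y 0 < st.2.2 then (y, j, PySem.List.pyGetD row y 0) else st) st) := by
    funext st j
    exact (pvInner _ j st).symm
  rw [hb]

lemma pvCorr : ∀ (rows : List (List Int)) (s v r c : Int),
    (PySem.List.enumerate rows s).foldl pvBStep (some (v, r, c))
    = some (((PySem.List.enumerate rows s).foldl pvRowStep (c, r, v)).2.2,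
            ((PySem.List.enumerate rows s).foldl pvRowStep (c, r, v)).2.1,
            ((PySem.List.enumerate rows s).foldl pvRowStep (c, r, v)).1)
  | [], s, v, r, c => by simp
  | row :: rest, s, v, r, c => by
    rw [PySem.List.enumerate_cons, List.foldl_cons, List.foldl_cons]
    by_cases hrow : row = []
    · have h1 : pvBStep (some (v, r, c)) (s, row) = some (v, r, c) := by
        simp [pvBStep, hrow]
      have h2 : pvRowStep (c, r, v) (s, row) = (c, r, v) := by
        simp only [pvRowStep, hrow]
        rw [show PySem.List.min? ([] : List Int) (fun z => z) = none from rfl]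
      rw [h1, h2, pvCorr rest (s + 1) v r c]
    · obtain ⟨v', hv'⟩ : ∃ v', PySem.List.min? row (fun z => z) = some v' := by
        cases hm : PySem.List.min? row (fun z => z) with
        | none => exact absurd ((PySem.List.min?_eq_none_iff row _).mp hm) hrow
        | some v' => exact ⟨v', rfl⟩
      by_cases hlt : v' < v
      · have h1 : pvBStep (some (v, r, c)) (s, row)
            = some (v', s, (((PySem.List.index? row v').getD 0 : Nat) : Int)) := by
          simp [pvBStep, hrow, hv', hlt]
        have h2 : pvRowStep (c, r, v) (s, row)
            = ((((PySem.List.index? row v').getD 0 : Nat) : Int), s, v') := by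
          simp [pvRowStep, hv', hlt]
        rw [h1, h2, pvCorr rest (s + 1) v' s _]
      · have h1 : pvBStep (some (v, r, c)) (s, row) = some (v, r, c) := by
          simp [pvBStep, hrow, hv', hlt]
        have h2 : pvRowStep (c, r, v) (s, row) = (c, r, v) := by
          simp [pvRowStep, hv', hlt]
        rw [h1, h2, pvCorr rest (s + 1) v r c]

lemma pvFirstRow (h : Int) (t : List Int) :
    pvRowStep ((0 : Int), (0 : Int), h) ((0 : Int), h :: t)
    = ((((PySem.List.index? (h :: t) (List.foldl min h t)).getD 0 : Nat) : Int), 0,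
       List.foldl min h t) := by
  unfold pvRowStep
  rw [PySem.List.min?_id_cons]
  have hle : List.foldl min h t ≤ h :=
    PySem.List.min?_isMin (PySem.List.min?_id_cons h t) h (List.mem_cons_self)
  by_cases hlt : List.foldl min h t < h
  · simp [hlt]
  · have heq : List.foldl min h t = h := by omega
    rw [heq, PySem.List.index?_cons_self]
    simp

-- ===== VERDICT (by name: the statement is the Claim_ definition above) =====
theorem find2Dmin_spec : Claim_equal_find2Dmin := by
  intro matrix _ hpre
  unfold Spec_find2Dmin
  cases matrix with
  | nil => simp [Pre_find2Dmin] at hpre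
  | cons row0 rest =>
    cases row0 with
    | nil => simp [Pre_find2Dmin] at hpre
    | cons h t =>
      show find2Dmin ((h :: t) :: rest) = find2Dmin_alt ((h :: t) :: rest)
      unfold find2Dmin find2Dmin_alt
      rw [show (fun (best : Option (Int × Int × Int)) (p : Int × List Int) =>
            if p.2 ≠ [] then
              let v := (PySem.List.min? p.2 (fun z => z)).getD 0
              match best with
              | none => some (v, p.1, (((PySem.List.index? p.2 v).getD 0 : Nat) : Int))
              | some b => if v < b.1 then some (v, p.1, (((PySem.List.index? p.2 v).getD 0 : Nat) : Int)) else some b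
            else best) = pvBStep from rfl]
      rw [pvOuterEq]
      rw [show PySem.List.pyGetD (PySem.List.pyGetD ((h :: t) :: rest) 0 []) 0 0 = h by
        rw [PySem.List.pyGetD_zero_cons, PySem.List.pyGetD_zero_cons]]
      rw [PySem.List.enumerate_cons, List.foldl_cons, List.foldl_cons, pvFirstRow]
      have hb0 : pvBStep (none : Option (Int × Int × Int)) ((0 : Int), h :: t)
          = some (List.foldl min h t, 0,
              (((PySem.List.index? (h :: t) (List.foldl min h t)).getD 0 : Nat) : Int)) := by
        simp [pvBStep, PySem.List.min?_id_cons]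
      rw [hb0, pvCorr]
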